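/-
  jsmn_s.bin, `jsmn_parse`, `case '{': case '[':` after jsmn_alloc_token has returned the fresh token `&tokens[i]` in rax
  (100364H – 10038DH + the stub 1005E7H: 14 instructions, then `open_tail`):
      if (parser->toksuper != -1) {
        jsmntok_t *t = &tokens[parser->toksuper];
        if (t->type == JSMN_OBJECT) return JSMN_ERROR_INVAL;        /* JSMN_STRICT */
        t->size++;
        token->parent = parser->toksuper;                            /* JSMN_PARENT_LINKS */
      }
  `open_link`: 100364H → 100486H (through `open_tail`) | 100325H.
-/
import Prog.Jsmn.S.ParseOpenTail

namespace X86
namespace J6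
namespace S
open X86.User (CodeAt RegsKept Span FlagsOK Layout toNat_add_ofNat toNat_ofNat_lt' add_ofNat_add)
open Jsmn JsmnSBytes

set_option maxRecDepth 100000
set_option maxHeartbeats 4000000
set_option linter.unusedSimpArgs false
set_option linter.unusedVariables false

variable {n : User.Layout}

/-- Where the case ends once the fresh token `i` is allocated (parser `p'`, tokens `ts'`): the three ways of `Jsmn.openBracket`. `r12` is the
count register, which this part of the code does not touch (except to load the error code). -/
def OpenEnd (c : PCtx) (n : User.Layout) (v0 : User.State) (ch : UInt8) (i : Nat) (p' : Parser) (ts' : Tokens) (r12 : Word) (v' : User.State) : Prop :=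
  if p'.toksuper = -1 then v'.rip = 0x100486 ∧ FrameCore c n v0 v' (openFinP p') (some (openFinT ch i p' ts')) ∧ v'.reg .r12 = r12
  else if (tokAt ts' p'.toksuper).type = JSMN_OBJECT then
    v'.rip = 0x100325 ∧ FrameCore c n v0 v' p' (some ts') ∧ Word.low .w32 (v'.reg .r12) = UInt64.ofNat (u32 JSMN_ERROR_INVAL)
  else v'.rip = 0x100486 ∧ FrameCore c n v0 v' (openFinP p') (some (openFinT ch i p' (openLinkT i p' ts'))) ∧ v'.reg .r12 = r12

/-- **100364H → 100486H | 100325H**. -/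
theorem open_link {c : PCtx} {v0 v : User.State} {p' : Parser} {ts' : Tokens} {i : Nat} {ch : UInt8}
    (hrip : v.rip = 0x100364) (hco : FrameCore c n v0 v p' (some ts')) (hrax : v.reg .rax = c.tb + UInt64.ofNat (20 * i))
    (hrbx : v.reg .rbx = ch.toUInt64) (hilt : i < c.numTokens) (hinv1 : Inv Config.strictLinks p' (some ts') c.numTokens) :
    Reach n v (OpenEnd c n v0 ch i p' ts' (v.reg .r12)) := by
  have hp := hco.entry.pre
  have himg := hco.image
  have hcode := hco.code
  have hfetch := hp.call.fetch
  obtain ⟨htb0, htlen, htoks⟩ := hco.toksArg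
  have hpa := hco.parser
  have henv := hp.env
  have htb : toksBytes binS.cfg c.numTokens c.toks0 = 20 * c.numTokens := by
    rw [← toksBytes_congr _ _ hco.null]; rfl
  rw [htb] at henv
  have hR := henv.toksR.resolve_left htb0
  have htinv1 := hinv1.toks ts' rfl
  have hsuplo := htinv1.superLo
  have hsuphi := htinv1.superHi
  simp only [links_strictLinks, if_true] at hsuphi
  have hnextle := htinv1.toknext
  have hsmall := htinv1.small
  obtain ⟨hsupraw, hsupr1, hsupr2⟩ := hpa.toksuper
  v3_open hco.rsp hco.rbp hco.r13 hp.call henv.parserR hR henv.parserToks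
  clear hp_call_rip
  j6_bin
  have hmuli := tokSize_mul_le Config.strictLinks (htlen ▸ hilt : i < ts'.length)
  rw [tokSize_strictLinks, htlen] at hmuli
  -- the frame after stores into the token array
  have hcore : ∀ (v' : User.State) (ts2 : Tokens), v'.reg .rsp = v.reg .rsp → v'.reg .rbp = v.reg .rbp → v'.reg .r15 = v.reg .r15 →
      v'.reg .r14 = v.reg .r14 → v'.reg .r13 = v.reg .r13 →
      SameOutside v.mem v'.mem [((v0.reg .rsp).toNat - 96, (v0.reg .rsp).toNat - 56), (c.pa.toNat, c.pa.toNat + 12),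
        (c.tb.toNat, c.tb.toNat + 20 * c.numTokens)] →
      ParserAt v'.mem c.pa p' → ts2.length = c.numTokens → TokensAt Config.strictLinks v'.mem c.tb ts2 →
      FrameCore c n v0 v' p' (some ts2) := by
    intro v' ts2 e1 e2 e3 e4 e5 hs hp' hl' ht'
    exact A2.core_step hco e1 e2 e3 e4 e5 (by unfold dataWins PCtx.tlen; rw [htb]; exact hs) hp' ⟨htb0, hl', ht'⟩ (by simp)
  by_cases hm1 : p'.toksuper = -1
  · -- no superior token
    have hsupv : v.mem.readLE (c.pa + 8) 4 = 4294967295 := by rw [hsupraw, hm1]; rfl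
    clear hsupraw
    v3_walk hcode hfetch [] until [0x100390]
    refine Reach.mono (open_tail (ch := ch) (i := i) (p' := p') (tsL := ts') (by simp)
      (hcore _ ts' (by v3_regnorm) (by v3_regnorm) (by v3_regnorm) (by v3_regnorm) (by v3_regnorm) (by v3_same) (by v3_memnorm; exact hpa) htlen
        (by v3_memnorm; exact htoks))
      (by v3_regnorm; exact hrax) (by v3_regnorm; exact hrbx) hilt) ?_
    rintro v' ⟨hrip', hco', hr12'⟩
    unfold OpenEnd
    rw [if_pos hm1]
    exact ⟨hrip', hco', by rw [hr12']; v3_regnorm⟩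
  · -- there is a superior token j
    obtain ⟨j, hj⟩ : ∃ j : Nat, p'.toksuper = j := ⟨p'.toksuper.toNat, by omega⟩
    have hjlt : j < c.numTokens := by omega
    have hsupv : v.mem.readLE (c.pa + 8) 4 = j := by rw [hsupraw, hj]; unfold u32; omega
    clear hsupraw
    have hsext := Word.sext32_ofNat_of_lt j (by omega)
    have hlea := lea20_ofNat j (by omega)
    have hjl : j < ts'.length := htlen ▸ hjlt
    have hmulj := tokSize_mul_le Config.strictLinks hjl
    rw [tokSize_strictLinks, htlen] at hmulj
    have htj := htoks.getD j hjl
    rw [A2.tokAddr20] at htj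
    have htjt := htj.type
    have hta : (tokAt ts' p'.toksuper).type = (ts'.getD j default).type := by rw [hj, A2.tokAt_nat]
    by_cases hobj : (ts'.getD j default).type = JSMN_OBJECT
    · -- STRICT: the superior token is an object: return JSMN_ERROR_INVAL
      rw [hobj] at htjt
      change v.mem.readLE (c.tb + UInt64.ofNat (20 * j)) 4 = 1 at htjt
      v3_walk hcode hfetch [hsext, hlea, show ((233 : Nat) == 235) = false by decide, show ((233 : UInt8) == 235) = false by decide,
        show ((233 : UInt64) == 235) = false by decide] until [0x100390, 0x100325]
      refine Reach.done ?_
      unfold OpenEnd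
      rw [if_neg hm1, hta, if_pos hobj]
      exact ⟨by simp, hcore _ ts' (by v3_regnorm) (by v3_regnorm) (by v3_regnorm) (by v3_regnorm) (by v3_regnorm) (by v3_same)
        (by v3_memnorm; exact hpa) htlen (by v3_memnorm; exact htoks), by v3_regnorm; decide⟩
    · -- tokens[j].size++; token->parent = j
      have htylt : (ts'.getD j default).type < 4294967296 := htjt ▸ User.Mem.readLE4_lt _ _
      obtain ⟨ty, hty, htyne, htylt'⟩ : ∃ ty : Nat, v.mem.readLE (c.tb + UInt64.ofNat (20 * j)) 4 = ty ∧ ty ≠ 1 ∧ ty < 4294967296 :=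
        ⟨_, htjt, hobj, htylt⟩
      clear htjt
      have hszlt : v.mem.readLE (c.tb + UInt64.ofNat (20 * j) + 12) 4 < 4294967296 := User.Mem.readLE4_lt _ _
      v3_walk hcode hfetch [hsext, hlea] until [0x100381]
      v3_walk hcode hfetch [] until [0x10038a]
      v3_walk hcodeW hfetch [] until [0x100390]
      have hw1 : (Word.low .w32 (UInt64.ofNat (v.mem.readLE (c.tb + UInt64.ofNat (20 * j) + 12) 4) + 1)).toNat % 256 ^ 4
          = (v.mem.readLE (c.tb + UInt64.ofNat (20 * j) + 12) 4 + 1) % 4294967296 := by v3_omega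
      have hw2 : Holds32 ((Word.low .w32 (UInt64.ofNat j)).toNat % 256 ^ 4) (j : Int) := by
        have e : (Word.low .w32 (UInt64.ofNat j)).toNat % 256 ^ 4 = u32 (j : Int) := by
          have e2 : u32 (j : Int) = j := by unfold u32; omega
          rw [e2]; v3_omega
        rw [e]
        exact holds32_of_range _ (by omega) (by omega)
      have hT1 := A2.bump_tokens htoks htlen hjlt (by v3_omega) hw1
      have hlenU : (tokUpd ts' (j : Int) fun t => { t with size := i32 (t.size + 1) }).length = c.numTokens := by
        rw [A2.tokUpd_nat, List.length_set]; exact htlen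
      have hT2 := parent_tokens (i := i) hT1 hlenU hilt (by v3_omega) hw2
      refine Reach.mono (open_tail (ch := ch) (i := i) (p' := p') (tsL := openLinkT i p' ts') (by simp)
        (hcore _ _ (by v3_regnorm) (by v3_regnorm) (by v3_regnorm) (by v3_regnorm) (by v3_regnorm) (by v3_same) (by v3_frame hpa)
          (by unfold openLinkT; rw [List.length_set, hj]; exact hlenU)
          (by v3_memnorm; unfold openLinkT; rw [hj]; exact hT2))
        (by v3_regnorm; exact hrax) (by v3_regnorm; exact hrbx) hilt) ?_
      rintro v' ⟨hrip', hco', hr12'⟩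
      unfold OpenEnd
      rw [if_neg hm1, hta, if_neg hobj]
      exact ⟨hrip', hco', by rw [hr12']; v3_regnorm⟩

end S
end J6
end X86
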